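-- pv_equiv track=rewrite | github.com/seanchatmangpt/AutoGPT | autogpts/test_agent/forge/sdk/benchmarks/matrix_overnight/import_libraries_parse_tasks_functionpy_2023-10-24_09-24-29.py | prioritize_tasks
-- ===== SOURCE A (Python) =====
-- from operator import itemgetter
--
-- def prioritize_tasks(tasks, criteria):
--     """
--     Prioritizes tasks based on urgency, importance, or other criteria.
--
--     Args:
--         tasks (list): A list of tasks.
--         criteria (str): The criteria to prioritize tasks by.
--
--     Returns:
--         list: A list of tasks in order of priority.
--     """
--     # Initialize a dictionary to store tasks and their priority values
--     task_priorities = {}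
--
--     # Loop through the list of tasks
--     for task in tasks:
--         # Calculate the priority value for the task based on the given criteria
--         if criteria == "urgency":
--             priority = 1
--         elif criteria == "importance":
--             priority = 2
--         else:
--             priority = 3
--
--         # Add the task and its priority value to the dictionary
--         task_priorities[task] = priority
--
--     # Sort the dictionary by the priority values in descending order
--     sorted_task_priorities = sorted(
--         task_priorities.items(), key=itemgetter(1), reverse=True
--     )
--
--     # Return a list of tasks in order of priority
--     return [task[0] for task in sorted_task_priorities]
-- ===== SOURCE B (Python) =====
-- def prioritize_tasks(tasks, criteria):
--     """Single-pass ordered dedup: first occurrence of each task, in order.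
--     criteria is accepted but (as in A) never affects the order, since A
--     assigns every task the same priority."""
--     seen = set()
--     result = []
--     for task in tasks:
--         if task not in seen:
--             seen.add(task)
--             result.append(task)
--     return result
-- ===== Notes on version B (the rewrite author's own statement) =====
-- stated objective: simpler
-- what changed: Replaced the dict-of-constant-priorities plus a stable no-op sort with a single pass keeping a seen-set and an insertion-ordered result list (A's sort never reorders because every priority is equal).
import Mathlib
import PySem

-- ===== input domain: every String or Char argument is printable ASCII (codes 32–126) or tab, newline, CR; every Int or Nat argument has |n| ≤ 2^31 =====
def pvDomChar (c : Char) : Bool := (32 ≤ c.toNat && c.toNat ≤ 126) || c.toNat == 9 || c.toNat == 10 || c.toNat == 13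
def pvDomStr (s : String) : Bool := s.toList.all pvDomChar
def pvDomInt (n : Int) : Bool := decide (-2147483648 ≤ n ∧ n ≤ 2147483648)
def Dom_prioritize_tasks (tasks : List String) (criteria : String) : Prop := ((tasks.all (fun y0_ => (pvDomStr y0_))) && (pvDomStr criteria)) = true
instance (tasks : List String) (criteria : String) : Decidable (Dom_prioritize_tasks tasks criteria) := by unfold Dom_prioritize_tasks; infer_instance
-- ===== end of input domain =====

-- B replaces A's dict-of-equal-priorities plus a stable sort by a single
-- seen-set/result-list pass; both return the first occurrence of each task in order.

-- ===== PORT A =====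
def prioritize_tasks (tasks : List String) (criteria : String) : List String :=
  let task_priorities : PySem.Dict String Int :=
    tasks.foldl
      (fun d task =>
        let priority : Int :=
          if criteria == "urgency" then 1
          else if criteria == "importance" then 2
          else 3
        d.insert task priority)
      PySem.Dict.empty
  let sorted_task_priorities :=
    PySem.List.sorted task_priorities.items (fun p => p.2) true
  sorted_task_priorities.map (fun task => task.1)

-- ===== PORT B =====
def prioritize_tasks_alt (tasks : List String) (criteria : String) : List String :=
  let st : PySem.Set String × List String :=
    tasks.foldl
      (fun st task =>
        if PySem.Set.contains st.1 task then st
        else (PySem.Set.add st.1 task, st.2 ++ [task]))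
      (PySem.Set.empty, [])
  st.2

-- ===== PRECONDITION & SPEC =====
def Spec_prioritize_tasks (tasks : List String) (criteria : String) (out : List String) : Prop := out = prioritize_tasks_alt tasks criteria
instance (tasks : List String) (criteria : String) (out : List String) : Decidable (Spec_prioritize_tasks tasks criteria out) := by unfold Spec_prioritize_tasks; infer_instance

-- ===== CLAIM (what is proved, stated in full; the proofs are below) =====
def Claim_equal_prioritize_tasks : Prop := ∀ (tasks : List String) (criteria : String), Dom_prioritize_tasks tasks criteria → Spec_prioritize_tasks tasks criteria (prioritize_tasks tasks criteria)

-- ===== LEMMAS AND PROOFS =====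

-- every value stored by A's loop is the same constant c
theorem values_const (tasks : List String) (c : Int) (d : PySem.Dict String Int)
    (hd : ∀ p ∈ d.items, p.2 = c) :
    ∀ p ∈ (tasks.foldl (fun d task => d.insert task c) d).items, p.2 = c := by
  induction tasks generalizing d with
  | nil => exact hd
  | cons t ts ih =>
    refine ih (d.insert t c) ?_
    intro p hp
    rcases (PySem.Dict.mem_items_insert d t c p).1 hp with h | h
    · simp [h]
    · exact hd p h.1

-- B's loop keeps seen = result; both equal the Set.add fold
theorem alt_fold_eq (tasks : List String) (s : PySem.Set String) :
    tasks.foldl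
      (fun (st : PySem.Set String × List String) task =>
        if PySem.Set.contains st.1 task then st
        else (PySem.Set.add st.1 task, st.2 ++ [task]))
      (s, s)
    = (tasks.foldl PySem.Set.add s, tasks.foldl PySem.Set.add s) := by
  induction tasks generalizing s with
  | nil => rfl
  | cons t ts ih =>
    simp only [List.foldl]
    by_cases h : t ∈ s
    · have hc : PySem.Set.contains s t = true := (PySem.Set.contains_iff s t).2 h
      rw [hc]
      simp only [if_true, PySem.Set.add_of_mem h]
      exact ih s
    · have hc : PySem.Set.contains s t = false := by
        by_contra hne
        exact h ((PySem.Set.contains_iff s t).1 (by revert hne; cases PySem.Set.contains s t <;> simp))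
      rw [hc]
      simp only [Bool.false_eq_true, if_false, PySem.Set.add_of_not_mem h]
      exact ih (s ++ [t])

theorem alt_eq_ofList (tasks : List String) (criteria : String) :
    prioritize_tasks_alt tasks criteria = PySem.Set.ofList tasks := by
  unfold prioritize_tasks_alt
  have h := alt_fold_eq tasks PySem.Set.empty
  rw [PySem.Set.ofList_eq_foldl]
  exact congrArg Prod.snd h

-- ===== VERDICT (by name: the statement is the Claim_ definition above) =====
theorem prioritize_tasks_spec : Claim_equal_prioritize_tasks := by
  intro tasks criteria _
  unfold Spec_prioritize_tasks prioritize_tasks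
  rw [alt_eq_ofList]
  set c : Int := if criteria == "urgency" then 1 else if criteria == "importance" then 2 else 3 with hc
  set d := tasks.foldl (fun d task => d.insert task c) PySem.Dict.empty with hdd
  have hconst : ∀ p ∈ d.items, p.2 = c := by
    rw [hdd]
    exact values_const tasks c PySem.Dict.empty (by simp [PySem.Dict.empty])
  have hpw : d.items.Pairwise (fun a b => (fun p : String × Int => p.2) b ≤ (fun p : String × Int => p.2) a) := by
    refine List.pairwise_of_forall_mem_list ?_
    intro a ha b hb
    simp [hconst a ha, hconst b hb]
  show List.map (fun task => task.1) (PySem.List.sorted d.items (fun p => p.2) true) = PySem.Set.ofList tasks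
  rw [PySem.List.sorted_rev_eq_self_of_pairwise _ _ hpw]
  have hkeys : d.items.map (fun p => p.1) = d.keys := rfl
  rw [hkeys, hdd, PySem.Dict.keys_foldl_insert]
  have : (PySem.Dict.empty : PySem.Dict String Int).keys = [] := rfl
  rw [this, PySem.Set.update_nil_left]
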